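-- pv_equiv track=rewrite | github.com/Leedefend/sce-backend-odoo | addons/smart_construction_scene/services/scene_package_service.py | _semver_key
-- ===== SOURCE A (Python) =====
-- def _semver_key(version):
--     raw = str(version or "").strip()
--     parts = raw.split(".")
--     out = []
--     for part in parts:
--         try:
--             out.append(int(part))
--         except Exception:
--             out.append(0)
--     while len(out) < 3:
--         out.append(0)
--     return tuple(out[:3])
-- ===== SOURCE B (Python) =====
-- def _int_or_zero(s):
--     try:
--         return int(s)
--     except Exception:
--         return 0
--
--
-- def _semver_key(version):
--     raw = str(version or "").strip()
--     major, _, rest = raw.partition(".")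
--     minor, _, rest = rest.partition(".")
--     patch, _, _ = rest.partition(".")
--     return (_int_or_zero(major), _int_or_zero(minor), _int_or_zero(patch))
-- ===== Notes on version B (the rewrite author's own statement) =====
-- stated objective: simpler
-- what changed: B replaces A's split-into-a-list / convert-every-part loop / pad-while-loop / [:3]-truncation pipeline with three straight-line str.partition steps at the dot separator that peel off exactly the first three fields (a missing field is the empty string, which the same int-or-0 conversion turns into 0), so no list, no loop and no padding exist at all.
import Mathlib
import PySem

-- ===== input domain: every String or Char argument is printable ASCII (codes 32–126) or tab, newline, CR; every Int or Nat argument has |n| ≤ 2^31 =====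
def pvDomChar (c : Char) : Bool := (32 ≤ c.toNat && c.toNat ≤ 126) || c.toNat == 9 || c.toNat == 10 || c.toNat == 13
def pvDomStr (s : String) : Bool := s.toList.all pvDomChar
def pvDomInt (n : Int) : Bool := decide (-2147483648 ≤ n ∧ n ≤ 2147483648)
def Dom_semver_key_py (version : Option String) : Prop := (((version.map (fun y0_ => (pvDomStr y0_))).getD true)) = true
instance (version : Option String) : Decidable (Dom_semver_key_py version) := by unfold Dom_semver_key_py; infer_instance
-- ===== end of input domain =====

-- B replaces A's split-list / convert-all loop / pad-while-loop / [:3] pipeline with three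
-- straight-line str.partition('.') steps (missing fields become "", converted to 0 by the same
-- int-or-0 rule); objective: simpler, loop-free. Same values everywhere.

-- ===== PORT A =====
-- int(part) with `except: 0` (the try/except in both Pythons)
def pvIntOr0 (s : String) : Int := (PySem.Int.ofStr? s).getD 0

-- `while len(out) < 3: out.append(0)`
def pvPad3 (out : List Int) : List Int :=
  if out.length < 3 then pvPad3 (out ++ [0]) else out
termination_by 3 - out.length

def semver_key_py (version : Option String) : Int × Int × Int :=
  let raw := PySem.Str.strip (version.getD "")      -- str(version or "").strip()
  let parts := (PySem.Str.split? raw ".").getD []   -- sep ≠ "" so split? is always some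
  let out := parts.foldl (fun acc p => acc ++ [pvIntOr0 p]) []
  match (pvPad3 out).take 3 with                    -- tuple(out[:3]); padded list has length ≥ 3
  | [a, b, c] => (a, b, c)
  | _ => (0, 0, 0)                                  -- unreachable totality guard

-- ===== PORT B =====
-- int(s)-or-0, over the character list of the field (same try/except int as in Source B)
def pvIntOr0C (cs : List Char) : Int := (PySem.Int.ofChars? cs).getD 0

-- s.partition("."): hand-ported (PySem has no partition); exact: splits at the FIRST '.',
-- returning (before, ".", after), or (s, "", "") when no '.' occurs.
def pvPartitionDot (cs : List Char) : List Char × List Char × List Char :=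
  match cs with
  | [] => ([], [], [])
  | c :: rest =>
    if c = '.' then ([], ['.'], rest)
    else
      let p := pvPartitionDot rest
      (c :: p.1, p.2.1, p.2.2)

def semver_key_py_alt (version : Option String) : Int × Int × Int :=
  let raw := (PySem.Str.strip (version.getD "")).toList   -- str(version or "").strip()
  let p1 := pvPartitionDot raw                            -- major, _, rest = raw.partition(".")
  let p2 := pvPartitionDot p1.2.2                         -- minor, _, rest = rest.partition(".")
  let p3 := pvPartitionDot p2.2.2                         -- patch, _, _  = rest.partition(".")
  (pvIntOr0C p1.1, pvIntOr0C p2.1, pvIntOr0C p3.1)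

-- ===== PRECONDITION & SPEC =====
def Spec_semver_key_py (version : Option String) (out : Int × Int × Int) : Prop := out = semver_key_py_alt version
instance (version : Option String) (out : Int × Int × Int) : Decidable (Spec_semver_key_py version out) := by unfold Spec_semver_key_py; infer_instance

-- ===== CLAIM (what is proved, stated in full; the proofs are below) =====
def Claim_equal_semver_key_py : Prop := ∀ (version : Option String), Dom_semver_key_py version → Spec_semver_key_py version (semver_key_py version)

-- ===== LEMMAS AND PROOFS =====

-- reference single-char split on '.', used to relate PySem's fuelled splitOn to pvPartitionDot
def pvSplitDot : List Char → List (List Char)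
  | [] => [[]]
  | c :: rest =>
    if c = '.' then [] :: pvSplitDot rest
    else
      match pvSplitDot rest with
      | f :: fs => (c :: f) :: fs
      | [] => [[c]]

theorem pvSplitDot_ne_nil (cs : List Char) : pvSplitDot cs ≠ [] := by
  induction cs with
  | nil => simp [pvSplitDot]
  | cons c rest ih =>
    simp only [pvSplitDot]
    split
    · simp
    · cases h : pvSplitDot rest with
      | nil => simp
      | cons f fs => simp

-- prepend p to the first chunk
def pvConsHead (p : List Char) : List (List Char) → List (List Char)
  | [] => [p]
  | f :: fs => (p ++ f) :: fs

theorem pv_go_eq (fuel : Nat) (l cur : List Char) (acc : List (List Char))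
    (h : l.length < fuel) :
    PySem.Chars.splitOn.go ['.'] fuel l cur acc
      = acc.reverse ++ pvConsHead cur.reverse (pvSplitDot l) := by
  induction fuel generalizing l cur acc with
  | zero => omega
  | succ n ih =>
    cases l with
    | nil =>
      simp [PySem.Chars.splitOn.go, pvSplitDot, pvConsHead]
    | cons c rest =>
      by_cases hc : c = '.'
      · subst hc
        rw [show PySem.Chars.splitOn.go ['.'] (n+1) ('.' :: rest) cur acc
              = PySem.Chars.splitOn.go ['.'] n (List.drop 1 ('.' :: rest)) [] (cur.reverse :: acc) by
            simp [PySem.Chars.splitOn.go, List.isPrefixOf]]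
        rw [ih _ _ _ (by simp at h ⊢; omega)]
        cases hs : pvSplitDot rest with
        | nil => exact absurd hs (pvSplitDot_ne_nil rest)
        | cons f fs =>
          simp [pvSplitDot, hs, pvConsHead]
      · rw [show PySem.Chars.splitOn.go ['.'] (n+1) (c :: rest) cur acc
              = PySem.Chars.splitOn.go ['.'] n rest (c :: cur) acc by
            simp [PySem.Chars.splitOn.go, List.isPrefixOf, Ne.symm hc]]
        rw [ih _ _ _ (by simp at h ⊢; omega)]
        cases hs : pvSplitDot rest with
        | nil => exact absurd hs (pvSplitDot_ne_nil rest)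
        | cons f fs =>
          simp [pvSplitDot, hc, hs, pvConsHead]

theorem pv_splitOn_eq (cs : List Char) :
    PySem.Chars.splitOn cs ['.'] = pvSplitDot cs := by
  rw [show PySem.Chars.splitOn cs ['.'] = PySem.Chars.splitOn.go ['.'] (cs.length + 1) cs [] [] from rfl]
  rw [pv_go_eq _ _ _ _ (by omega)]
  cases hs : pvSplitDot cs with
  | nil => exact absurd hs (pvSplitDot_ne_nil cs)
  | cons f fs => simp [pvConsHead]

theorem pv_partition_nodot (cs : List Char) (h : (pvPartitionDot cs).2.1 = []) :
    (pvPartitionDot cs).2.2 = [] := by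
  induction cs with
  | nil => simp [pvPartitionDot]
  | cons c rest ih =>
    by_cases hc : c = '.'
    · simp [pvPartitionDot, hc] at h
    · simp [pvPartitionDot, hc] at h ⊢
      exact ih h

theorem pv_splitDot_partition (cs : List Char) :
    pvSplitDot cs
      = (pvPartitionDot cs).1 ::
        (if (pvPartitionDot cs).2.1 = [] then [] else pvSplitDot (pvPartitionDot cs).2.2) := by
  induction cs with
  | nil => simp [pvSplitDot, pvPartitionDot]
  | cons c rest ih =>
    by_cases hc : c = '.'
    · simp [pvSplitDot, pvPartitionDot, hc]
    · simp only [pvSplitDot, pvPartitionDot, if_neg hc]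
      rw [ih]

theorem pv_foldl_app (parts : List String) (acc : List Int) :
    parts.foldl (fun acc p => acc ++ [pvIntOr0 p]) acc = acc ++ parts.map pvIntOr0 := by
  induction parts generalizing acc with
  | nil => simp
  | cons p ps ih => simp [List.foldl, ih]

theorem pv_intOr0C_nil : pvIntOr0C [] = 0 := by decide

theorem pv_intOr0_ofList (cs : List Char) : pvIntOr0 (String.ofList cs) = pvIntOr0C cs := by
  simp [pvIntOr0, pvIntOr0C, PySem.Int.ofStr?]

-- the value of A's pad/take/match pipeline as a function of the field list's shape
def pvShape (L : List (List Char)) : Int × Int × Int :=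
  match L with
  | [] => (0, 0, 0)
  | [a] => (pvIntOr0C a, 0, 0)
  | [a, b] => (pvIntOr0C a, pvIntOr0C b, 0)
  | a :: b :: c :: _ => (pvIntOr0C a, pvIntOr0C b, pvIntOr0C c)

-- A's pad/take/match pipeline, evaluated on the three possible shapes of the field list
theorem pv_A_shape (L : List (List Char)) :
    (match (pvPad3 ((L.map String.ofList).foldl (fun acc p => acc ++ [pvIntOr0 p]) [])).take 3 with
     | [a, b, c] => (a, b, c)
     | _ => ((0 : Int), (0 : Int), (0 : Int))) = pvShape L := by
  rw [pv_foldl_app]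
  match L with
  | [] => simp [pvPad3, pvShape]
  | [a] => simp [pvPad3, pvShape, pv_intOr0_ofList]
  | [a, b] => simp [pvPad3, pvShape, pv_intOr0_ofList]
  | a :: b :: c :: rest =>
    rw [pvPad3, if_neg (by simp)]
    simp [pvShape, pv_intOr0_ofList]

theorem pv_core_eq (raw : String) :
    (match (pvPad3 ((((PySem.Str.split? raw ".").getD []).foldl
        (fun acc p => acc ++ [pvIntOr0 p]) []))).take 3 with
     | [a, b, c] => (a, b, c)
     | _ => ((0 : Int), (0 : Int), (0 : Int))) =
    (pvIntOr0C (pvPartitionDot raw.toList).1,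
     pvIntOr0C (pvPartitionDot (pvPartitionDot raw.toList).2.2).1,
     pvIntOr0C (pvPartitionDot (pvPartitionDot (pvPartitionDot raw.toList).2.2).2.2).1) := by
  have hsplit : (PySem.Str.split? raw ".").getD []
      = (pvSplitDot raw.toList).map String.ofList := by
    simp [PySem.Str.split?, PySem.Chars.split?, pv_splitOn_eq]
  rw [hsplit, pv_A_shape]
  -- peel the first field
  rw [pv_splitDot_partition raw.toList]
  by_cases h1 : (pvPartitionDot raw.toList).2.1 = []
  · rw [pv_partition_nodot _ h1]
    simp [h1, pvShape, pvPartitionDot, pv_intOr0C_nil]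
  · rw [if_neg h1, pv_splitDot_partition (pvPartitionDot raw.toList).2.2]
    by_cases h2 : (pvPartitionDot (pvPartitionDot raw.toList).2.2).2.1 = []
    · rw [pv_partition_nodot _ h2]
      simp [h2, pvShape, pvPartitionDot, pv_intOr0C_nil]
    · rw [if_neg h2]
      cases hs : pvSplitDot (pvPartitionDot (pvPartitionDot raw.toList).2.2).2.2 with
      | nil => exact absurd hs (pvSplitDot_ne_nil _)
      | cons f fs =>
        rw [pv_splitDot_partition] at hs
        have hf := (List.cons.injEq _ _ _ _).mp hs
        simp [pvShape, hf.1]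

-- ===== VERDICT (by name: the statement is the Claim_ definition above) =====
theorem semver_key_py_spec : Claim_equal_semver_key_py := by
  intro version _
  unfold Spec_semver_key_py semver_key_py semver_key_py_alt
  exact pv_core_eq _
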